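-- pv_equiv track=rewrite | github.com/rinoale/react-vite | backend/lib/pipeline/line_split/line_splitter.py | group_by_y
-- ===== SOURCE A (Python) =====
-- from collections import OrderedDict
--
-- def group_by_y(lines):
--     """Group horizontally-split sub-lines by shared y-position.
--
--     Lines at the same y are sub-segments of one original line,
--     produced by horizontal splitting in _add_line().
--
--     Returns:
--         list of lists, each inner list contains sub-lines sorted by x.
--     """
--     groups = OrderedDict()
--     for line in lines:
--         y = line['y']
--         if y not in groups:
--             groups[y] = []
--         groups[y].append(line)
--
--     result = []
--     for y, sub_lines in groups.items():
--         sub_lines.sort(key=lambda l: l['x'])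
--         result.append(sub_lines)
--     return result
-- ===== SOURCE B (Python) =====
-- def group_by_y(lines):
--     """Group horizontally-split sub-lines by shared y-position.
--
--     Distinct y values in first-appearance order; each group is the lines
--     with that y, in original order, stably sorted by x.
--     """
--     ys = list(dict.fromkeys(l['y'] for l in lines))
--     return [sorted((l for l in lines if l['y'] == y), key=lambda l: l['x'])
--             for y in ys]
-- ===== Notes on version B (the rewrite author's own statement) =====
-- stated objective: idiomatic
-- what changed: Replaces the single-pass OrderedDict grouping loop with a dedup of the y-values followed by a per-y filter-and-sort comprehension over the original list.
import Mathlib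
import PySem

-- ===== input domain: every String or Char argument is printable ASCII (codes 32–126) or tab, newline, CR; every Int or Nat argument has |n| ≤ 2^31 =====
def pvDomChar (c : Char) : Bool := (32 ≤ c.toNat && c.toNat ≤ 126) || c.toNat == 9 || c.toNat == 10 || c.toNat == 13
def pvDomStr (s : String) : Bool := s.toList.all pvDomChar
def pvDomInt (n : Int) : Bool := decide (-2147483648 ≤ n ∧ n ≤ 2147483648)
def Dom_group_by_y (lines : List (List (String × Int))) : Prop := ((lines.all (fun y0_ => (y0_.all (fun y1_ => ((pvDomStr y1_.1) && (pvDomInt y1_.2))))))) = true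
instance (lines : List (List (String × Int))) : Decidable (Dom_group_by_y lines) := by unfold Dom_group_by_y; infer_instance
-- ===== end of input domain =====

-- B is a more idiomatic re-implementation: it builds the distinct y-values first and then
-- filters + stably sorts the matching lines per y, instead of A's single-pass dict grouping.
-- (A sorts its internal group lists in place; no argument is mutated. Return values agree.)

-- line[k] for a dict-valued line; exact wherever the key is present (Pre_ guarantees that)
def pvGetKey (l : List (String × Int)) (k : String) : Int :=
  ((PySem.Dict.mk l).get? k).getD 0

-- ===== PORT A =====
def group_by_y (lines : List (List (String × Int))) : List (List (List (String × Int))) :=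
  let groups := lines.foldl (fun g line =>
      let y := pvGetKey line "y"
      let g := if g.contains y then g else g.insert y ([] : List (List (String × Int)))
      g.modify y [] (fun s => s ++ [line]))
    PySem.Dict.empty
  groups.items.foldl (fun res p =>
      res ++ [PySem.List.sorted p.2 (fun l => pvGetKey l "x") false]) []

-- ===== PORT B =====
def group_by_y_alt (lines : List (List (String × Int))) : List (List (List (String × Int))) :=
  let ys := PySem.List.dedup (lines.map (fun l => pvGetKey l "y"))
  ys.map (fun y =>
    PySem.List.sorted (lines.filter (fun l => pvGetKey l "y" == y))
      (fun l => pvGetKey l "x") false)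

-- ===== PRECONDITION & SPEC =====
-- Pre_: every line dict has both keys 'y' and 'x'; the Python A raises KeyError otherwise.
def Pre_group_by_y (lines : List (List (String × Int))) : Prop :=
  (lines.all (fun l => (PySem.Dict.mk l).contains "y" && (PySem.Dict.mk l).contains "x")) = true
instance (lines : List (List (String × Int))) : Decidable (Pre_group_by_y lines) := by unfold Pre_group_by_y; infer_instance

def pvWitness_group_by_y : (List (List (String × Int))) :=
  [[("y", 2), ("x", 3)], [("y", 1), ("x", 0)], [("y", 2), ("x", 1)]]

def Spec_group_by_y (lines : List (List (String × Int))) (out : List (List (List (String × Int)))) : Prop := out = group_by_y_alt lines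
instance (lines : List (List (String × Int))) (out : List (List (List (String × Int)))) : Decidable (Spec_group_by_y lines out) := by unfold Spec_group_by_y; infer_instance

-- ===== CLAIM (what is proved, stated in full; the proofs are below) =====
def Claim_equal_group_by_y : Prop := ∀ (lines : List (List (String × Int))), Dom_group_by_y lines → Pre_group_by_y lines → Spec_group_by_y lines (group_by_y lines)

-- ===== LEMMAS AND PROOFS =====

-- A's insert-if-absent followed by append-at-the-key IS a single Dict.modify
lemma step_eq_modify (g : PySem.Dict Int (List (List (String × Int)))) (line : List (String × Int)) :
    (let y := pvGetKey line "y"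
     let g := if g.contains y then g else g.insert y ([] : List (List (String × Int)))
     g.modify y [] (fun s => s ++ [line]))
    = g.modify (pvGetKey line "y") [] (fun s => s ++ [line]) := by
  set y := pvGetKey line "y"
  by_cases h : g.contains y
  · simp [h]
  · simp only [h, if_false, Bool.false_eq_true]
    show (g.insert y []).insert y _ = g.insert y _
    rw [PySem.Dict.insert_insert_self, PySem.Dict.getD_insert_self,
        PySem.Dict.getD_of_not_contains (h := by simpa using h)]

-- the group A's dict holds at key c is exactly the filter B takes
lemma grouped_getD (lines : List (List (String × Int))) (c : Int) :
    ((lines.foldl (fun g line => g.modify (pvGetKey line "y") [] (fun s => s ++ [line]))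
        PySem.Dict.empty).getD c [])
    = lines.filter (fun l => pvGetKey l "y" == c) := by
  have := PySem.Dict.getD_foldl_modify_append
    (l := lines.map (fun l => (pvGetKey l "y", l))) (d := PySem.Dict.empty) (c := c)
  rw [List.foldl_map] at this
  simpa [List.filter_map, Function.comp_def] using this

lemma group_by_y_eq_alt (lines : List (List (String × Int))) :
    group_by_y lines = group_by_y_alt lines := by
  unfold group_by_y group_by_y_alt
  show (List.foldl _ PySem.Dict.empty lines).items.foldl _ [] = _
  rw [show (fun (g : PySem.Dict Int (List (List (String × Int)))) line =>
        let y := pvGetKey line "y"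
        let g := if g.contains y then g else g.insert y ([] : List (List (String × Int)))
        g.modify y [] (fun s => s ++ [line]))
      = fun g line => g.modify (pvGetKey line "y") [] (fun s => s ++ [line])
      from funext fun g => funext fun line => step_eq_modify g line]
  set G := lines.foldl (fun g line => g.modify (pvGetKey line "y") [] (fun s => s ++ [line])) PySem.Dict.empty with hG
  have hnd : G.keys.Nodup := by
    rw [hG]
    exact PySem.Dict.nodup_keys_foldl_modify_key lines (fun l => pvGetKey l "y") []
      (fun g l s => s ++ [l]) PySem.Dict.empty PySem.Dict.nodup_keys_empty
  rw [PySem.List.foldl_append_singleton_eq_map,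
      PySem.Dict.items_eq_map_keys G hnd [], List.map_map]
  have hkeys : G.keys = PySem.List.dedup (lines.map (fun l => pvGetKey l "y")) := by
    rw [hG, PySem.Dict.keys_foldl_modify_key]
    simp [PySem.Dict.keys_empty, PySem.List.dedup_eq_ofList, PySem.Set.update,
      PySem.Set.ofList_eq_foldl]
  rw [hkeys]
  simp only [Function.comp_def, List.nil_append]
  exact List.map_congr_left fun y _ => by rw [hG, grouped_getD]

-- ===== VERDICT (by name: the statement is the Claim_ definition above) =====
theorem group_by_y_spec : Claim_equal_group_by_y := by
  intro lines _ _
  exact group_by_y_eq_alt lines
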